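-- pv_equiv track=rewrite | github.com/allanRoberto/revesbot-final | apps/api/main.py | analisar_master
-- ===== SOURCE A (Python) =====
-- from typing import Dict, Any, Optional
-- from typing import List, Any, Dict, List, Tuple, Optional, Set
-- from typing import Dict, Any
-- from typing import List, Dict, Any, Optional
--
-- def analisar_master(historico: List[int]) -> Dict:
--     """Análise do padrão Master (exato)"""
--     candidatos = {}
--     janela = 3  # Janela de análise
--
--     # Procurar padrões exatos nas últimas 100 rodadas
--     for i in range(len(historico) - janela):
--         padrao_atual = tuple(historico[i:i+janela])
--
--         # Procurar esse padrão no histórico anterior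
--         for j in range(i + janela, min(len(historico) - 1, i + 200)):
--             if tuple(historico[j:j+janela]) == padrao_atual:
--                 # Número que veio depois desse padrão
--                 proximo = historico[j + janela] if j + janela < len(historico) else None
--                 if proximo is not None:
--                     candidatos[proximo] = candidatos.get(proximo, 0) + 1
--
--     return {"scores": candidatos}
-- ===== SOURCE B (Python) =====
-- def _bisect_left(a, x):
--     lo = 0
--     hi = len(a)
--     while lo < hi:
--         mid = (lo + hi) // 2
--         if a[mid] < x:
--             lo = mid + 1
--         else:
--             hi = mid
--     return lo
--
-- def analisar_master(historico):
--     """Análise do padrão Master (exato) — index the positions of every length-3 pattern once,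
--     then per i binary-search that pattern's position list for the window slice."""
--     n = len(historico)
--     pos = {}
--     for p in range(n - 2):
--         key = tuple(historico[p:p + 3])
--         pos.setdefault(key, []).append(p)
--     candidatos = {}
--     for i in range(n - 3):
--         js = pos.get(tuple(historico[i:i + 3]), [])
--         hi = min(n - 1, i + 200)
--         for j in js[_bisect_left(js, i + 3):_bisect_left(js, hi)]:
--             if j + 3 < n:
--                 nxt = historico[j + 3]
--                 candidatos[nxt] = candidatos.get(nxt, 0) + 1
--     return {"scores": candidatos}
-- ===== Notes on version B (the rewrite author's own statement) =====
-- stated objective: faster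
-- what changed: Instead of re-scanning the 200-window with tuple slice comparisons for every i, B builds once a dict mapping each length-3 pattern to its ascending position list and per i binary-searches that list for the window slice, visiting only actual matches.
import Mathlib
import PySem

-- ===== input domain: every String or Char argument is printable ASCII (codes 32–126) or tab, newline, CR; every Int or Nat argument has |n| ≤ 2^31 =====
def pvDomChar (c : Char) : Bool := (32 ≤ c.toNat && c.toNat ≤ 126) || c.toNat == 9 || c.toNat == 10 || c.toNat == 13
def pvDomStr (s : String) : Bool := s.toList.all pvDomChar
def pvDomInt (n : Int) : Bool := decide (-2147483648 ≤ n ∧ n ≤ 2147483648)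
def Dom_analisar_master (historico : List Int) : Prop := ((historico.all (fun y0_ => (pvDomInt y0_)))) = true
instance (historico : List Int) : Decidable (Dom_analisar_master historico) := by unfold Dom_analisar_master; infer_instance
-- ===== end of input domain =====

-- B replaces A's per-i rescan of the 200-window by one position index per length-3 pattern,
-- built once, each window then located by binary search; measurably faster.

-- ===== PORT A =====
def analisar_master (historico : List Int) : List (String × List (Int × Int)) :=
  let n : Int := historico.length
  let candidatos : PySem.Dict Int Int :=
    (PySem.List.pyRange 0 (n - 3) 1).foldl (fun cand i =>
      let padrao := PySem.List.slice historico (some i) (some (i + 3))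
      (PySem.List.pyRange (i + 3) (min (n - 1) (i + 200)) 1).foldl (fun cand j =>
        if PySem.List.slice historico (some j) (some (j + 3)) = padrao then
          match (if j + 3 < n then PySem.List.pyGet? historico (j + 3) else none) with
          | some proximo => cand.insert proximo (cand.getD proximo 0 + 1)
          | none => cand
        else cand) cand) PySem.Dict.empty
  [("scores", candidatos.items)]

-- ===== PORT B =====
-- used by the port's termination proof (decreasing_by) — hence placed above the port
theorem pvBisect_mid_bounds (lo hi : Int) (h : lo < hi) :
    lo ≤ PySem.Int.floordiv (lo + hi) 2 ∧ PySem.Int.floordiv (lo + hi) 2 < hi := by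
  have h1 := PySem.Int.floordiv_two_mid_bounds (lo := lo) (hi := hi) (by omega)
  have h2 : PySem.Int.floordiv (lo + hi) 2 < hi := by
    rw [PySem.Int.floordiv_lt_iff_lt_mul (by omega)]; omega
  exact ⟨h1.1, h2⟩

-- Source B's _bisect_left while-loop (a[mid] is always in range inside the loop, so pyGetD is exact there)
def pvBisectGo (a : List Int) (x : Int) (lo hi : Int) : Int :=
  if h : lo < hi then
    let mid := PySem.Int.floordiv (lo + hi) 2
    if PySem.List.pyGetD a mid 0 < x then pvBisectGo a x (mid + 1) hi
    else pvBisectGo a x lo mid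
  else lo
termination_by (hi - lo).toNat
decreasing_by
  · have := pvBisect_mid_bounds lo hi h; omega
  · have := pvBisect_mid_bounds lo hi h; omega

def pvBisectLeft (a : List Int) (x : Int) : Int := pvBisectGo a x 0 (a.length : Int)

def analisar_master_alt (historico : List Int) : List (String × List (Int × Int)) :=
  let n : Int := historico.length
  let pos : PySem.Dict (List Int) (List Int) :=
    (PySem.List.pyRange 0 (n - 2) 1).foldl (fun d p =>
      let key := PySem.List.slice historico (some p) (some (p + 3))
      d.modify key [] (· ++ [p])) PySem.Dict.empty
  let candidatos : PySem.Dict Int Int :=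
    (PySem.List.pyRange 0 (n - 3) 1).foldl (fun cand i =>
      let js := pos.getD (PySem.List.slice historico (some i) (some (i + 3))) []
      let hi := min (n - 1) (i + 200)
      (PySem.List.slice js (some (pvBisectLeft js (i + 3))) (some (pvBisectLeft js hi))).foldl
        (fun cand j =>
          if j + 3 < n then
            let nxt := PySem.List.pyGetD historico (j + 3) 0
            cand.insert nxt (cand.getD nxt 0 + 1)
          else cand) cand) PySem.Dict.empty
  [("scores", candidatos.items)]

-- ===== PRECONDITION & SPEC =====
def Spec_analisar_master (historico : List Int) (out : List (String × List (Int × Int))) : Prop := out = analisar_master_alt historico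
instance (historico : List Int) (out : List (String × List (Int × Int))) : Decidable (Spec_analisar_master historico out) := by unfold Spec_analisar_master; infer_instance

-- ===== CLAIM (what is proved, stated in full; the proofs are below) =====
def Claim_equal_analisar_master : Prop := ∀ (historico : List Int), Dom_analisar_master historico → Spec_analisar_master historico (analisar_master historico)

-- ===== LEMMAS AND PROOFS =====

-- the while-loop computes bisect_left, given the standard bracketing invariant
theorem pvBisectGo_eq (a : List Int) (x : Int) (T : Nat)
    (hT : T ≤ a.length) (hchar : ∀ (k : Nat) (hk : k < a.length), a[k] < x ↔ k < T) :
    ∀ (lo hi : Int), 0 ≤ lo → lo ≤ (T : Int) → (T : Int) ≤ hi → hi ≤ (a.length : Int) →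
    pvBisectGo a x lo hi = (T : Int) := by
  intro lo hi
  induction lo, hi using pvBisectGo.induct a x with
  | case1 lo hi h mid hlt ih =>
    intro h0 h1 h2 h3
    have hb := pvBisect_mid_bounds lo hi h
    have hmr : mid.toNat < a.length := by omega
    have hmv : PySem.List.pyGetD a mid 0 = a[mid.toNat] :=
      PySem.List.pyGetD_eq_getElem a 0 (by omega) (by omega)
    have hmid : mid = PySem.Int.floordiv (lo + hi) 2 := rfl
    rw [pvBisectGo, dif_pos h, if_pos (hmid ▸ hlt)]
    rw [← hmid]
    have hmT : mid.toNat < T := by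
      rw [hmv] at hlt; exact (hchar mid.toNat hmr).mp hlt
    exact ih (by omega) (by omega) h2 h3
  | case2 lo hi h mid hge ih =>
    intro h0 h1 h2 h3
    have hb := pvBisect_mid_bounds lo hi h
    have hmid : mid = PySem.Int.floordiv (lo + hi) 2 := rfl
    rw [pvBisectGo, dif_pos h, if_neg (hmid ▸ hge)]
    rw [← hmid]
    have hmT : (T:Int) ≤ mid := by
      by_contra hc
      push Not at hc
      have hmr : mid.toNat < a.length := by omega
      have := (hchar mid.toNat hmr).mpr (by omega)
      rw [PySem.List.pyGetD_eq_getElem a 0 (by omega) (by omega)] at hge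
      exact hge this
    exact ih h0 h1 hmT (by omega)
  | case3 lo hi h =>
    intro h0 h1 h2 h3
    rw [pvBisectGo, dif_neg h]
    omega

theorem pvBisectLeft_eq (a : List Int) (x : Int) (hs : a.Pairwise (· < ·)) :
    pvBisectLeft a x = (PySem.List.bisectLeft a x : Int) := by
  have hspec := PySem.List.bisectLeft_spec a x (hs.imp le_of_lt)
  obtain ⟨hle, hlt, hge⟩ := hspec
  exact pvBisectGo_eq a x (PySem.List.bisectLeft a x) hle
    (fun k hk => ⟨fun hx => by by_contra hc; push Not at hc; exact absurd (hge k hk hc) (by omega),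
                  fun hkT => hlt k hk hkT⟩)
    0 (a.length : Int) le_rfl (by omega) (by omega) (by omega)

-- slicing a strictly ascending list between the two bisection points is filtering by the window
theorem slice_bisect_eq_filter (a : List Int) (hs : a.Pairwise (· < ·)) (x y : Int) :
    PySem.List.slice a (some (pvBisectLeft a x)) (some (pvBisectLeft a y))
    = a.filter (fun j => decide (x ≤ j ∧ j < y)) := by
  rw [pvBisectLeft_eq a x hs, pvBisectLeft_eq a y hs, PySem.List.slice_natCast]
  obtain ⟨hle1, hlt1, hge1⟩ := PySem.List.bisectLeft_spec a x (hs.imp le_of_lt)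
  obtain ⟨hle2, hlt2, hge2⟩ := PySem.List.bisectLeft_spec a y (hs.imp le_of_lt)
  set b1 := PySem.List.bisectLeft a x with hb1
  set b2 := PySem.List.bisectLeft a y with hb2
  have hP1 : ((a.drop b1).take (b2 - b1)).Pairwise (· < ·) :=
    List.Pairwise.sublist ((List.take_sublist _ _).trans (List.drop_sublist _ _)) hs
  have hP2 : (a.filter (fun j => decide (x ≤ j ∧ j < y))).Pairwise (· < ·) :=
    List.Pairwise.sublist (List.filter_sublist) hs
  refine List.Pairwise.eq_of_mem_iff hP1 hP2 ?_
  intro j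
  rw [List.mem_filter]
  simp only [List.mem_iff_getElem, List.length_take, List.length_drop, List.getElem_take,
    List.getElem_drop, decide_eq_true_eq]
  constructor
  · rintro ⟨i, hi, rfl⟩
    have hk : b1 + i < a.length := by omega
    have hkb2 : b1 + i < b2 := by omega
    refine ⟨⟨b1 + i, hk, rfl⟩, ?_, hlt2 _ hk hkb2⟩
    exact hge1 _ hk (by omega)
  · rintro ⟨⟨k, hk, rfl⟩, hxj, hjy⟩
    have hkb1 : b1 ≤ k := by
      by_contra hc
      exact absurd (hlt1 k hk (by omega)) (by omega)
    have hkb2 : k < b2 := by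
      by_contra hc
      exact absurd (hge2 k hk (by omega)) (by omega)
    exact ⟨k - b1, by omega, by congr 1; omega⟩

theorem analisar_master_equal (historico : List Int) :
    analisar_master historico = analisar_master_alt historico := by
  unfold analisar_master analisar_master_alt
  simp only [List.cons.injEq, Prod.mk.injEq, and_true, true_and]
  congr 1
  apply PySem.List.foldl_congr_mem
  intro cand i hi_mem
  rw [PySem.List.mem_pyRange_one] at hi_mem
  obtain ⟨hi0, hin⟩ := hi_mem
  set n : Int := (historico.length : Int) with hn
  set padrao := PySem.List.slice historico (some i) (some (i + 3)) with hp
  set upd : PySem.Dict Int Int → Int → PySem.Dict Int Int := fun cand j =>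
    cand.insert (PySem.List.pyGetD historico (j + 3) 0)
      (cand.getD (PySem.List.pyGetD historico (j + 3) 0) 0 + 1) with hupd
  -- A's inner loop is a fold of upd over the slice-matching window positions
  have hA : (PySem.List.pyRange (i + 3) (min (n - 1) (i + 200)) 1).foldl (fun cand j =>
        if PySem.List.slice historico (some j) (some (j + 3)) = padrao then
          match (if j + 3 < n then PySem.List.pyGet? historico (j + 3) else none) with
          | some proximo => cand.insert proximo (cand.getD proximo 0 + 1)
          | none => cand
        else cand) cand
      = ((PySem.List.pyRange (i + 3) (min (n - 1) (i + 200)) 1).filter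
          (fun j => decide (PySem.List.slice historico (some j) (some (j + 3)) = padrao ∧ j + 3 < n))).foldl upd cand := by
    rw [← PySem.List.foldl_ite_eq_foldl_filter]
    apply PySem.List.foldl_congr_mem
    intro acc j hj
    rw [PySem.List.mem_pyRange_one] at hj
    by_cases hs : PySem.List.slice historico (some j) (some (j + 3)) = padrao
    · by_cases hlt : j + 3 < n
      · have h0 : (0:Int) ≤ j + 3 := by omega
        rw [if_pos hs, if_pos hlt, PySem.List.pyGet?_eq_some_getElem historico h0 (by omega),
          if_pos ⟨hs, hlt⟩, hupd]
        simp only [PySem.List.pyGetD_eq_getElem historico 0 h0 (by omega)]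
      · rw [if_pos hs, if_neg hlt, if_neg (by tauto)]
    · rw [if_neg hs, if_neg (by tauto)]
  -- B's position index at key padrao holds exactly the ascending matching positions
  have hpos : ((PySem.List.pyRange 0 (n - 2) 1).foldl (fun d p =>
        d.modify (PySem.List.slice historico (some p) (some (p + 3))) [] (· ++ [p]))
      (PySem.Dict.empty : PySem.Dict (List Int) (List Int))).getD padrao []
      = (PySem.List.pyRange 0 (n - 2) 1).filter
          (fun p => PySem.List.slice historico (some p) (some (p + 3)) == padrao) := by
    have h := PySem.Dict.getD_foldl_modify_append
      (l := (PySem.List.pyRange 0 (n - 2) 1).map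
        (fun p => (PySem.List.slice historico (some p) (some (p + 3)), p)))
      (d := (PySem.Dict.empty : PySem.Dict (List Int) (List Int))) (c := padrao)
    rw [List.foldl_map] at h
    simpa [List.filter_map, Function.comp_def] using h
  have hsortjs : ((PySem.List.pyRange 0 (n - 2) 1).filter
      (fun p => PySem.List.slice historico (some p) (some (p + 3)) == padrao)).Pairwise (· < ·) :=
    List.Pairwise.sublist (List.filter_sublist) (PySem.List.pairwise_lt_pyRange_one _ _)
  -- B's inner loop is a fold of upd over the index positions filtered to the window
  have hB : (PySem.List.slice
        (((PySem.List.pyRange 0 (n - 2) 1).foldl (fun d p =>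
            d.modify (PySem.List.slice historico (some p) (some (p + 3))) [] (· ++ [p]))
          (PySem.Dict.empty : PySem.Dict (List Int) (List Int))).getD padrao [])
        (some (pvBisectLeft (((PySem.List.pyRange 0 (n - 2) 1).foldl (fun d p =>
            d.modify (PySem.List.slice historico (some p) (some (p + 3))) [] (· ++ [p]))
          (PySem.Dict.empty : PySem.Dict (List Int) (List Int))).getD padrao []) (i + 3)))
        (some (pvBisectLeft (((PySem.List.pyRange 0 (n - 2) 1).foldl (fun d p =>
            d.modify (PySem.List.slice historico (some p) (some (p + 3))) [] (· ++ [p]))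
          (PySem.Dict.empty : PySem.Dict (List Int) (List Int))).getD padrao []) (min (n - 1) (i + 200))))).foldl
        (fun cand j => if j + 3 < n then upd cand j else cand) cand
      = (((((PySem.List.pyRange 0 (n - 2) 1).filter
            (fun p => PySem.List.slice historico (some p) (some (p + 3)) == padrao)).filter
            (fun j => decide (i + 3 ≤ j ∧ j < min (n - 1) (i + 200)))).filter
            (fun j => decide (j + 3 < n))).foldl upd cand) := by
    rw [hpos, slice_bisect_eq_filter _ hsortjs, PySem.List.foldl_ite_eq_foldl_filter]
  rw [hA, hB]
  -- the two filtered position lists coincide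
  congr 1
  have hP1 : (((PySem.List.pyRange (i + 3) (min (n - 1) (i + 200)) 1).filter
        (fun j => decide (PySem.List.slice historico (some j) (some (j + 3)) = padrao ∧ j + 3 < n)))).Pairwise (· < ·) :=
    List.Pairwise.sublist (List.filter_sublist) (PySem.List.pairwise_lt_pyRange_one _ _)
  have hP2 : (((((PySem.List.pyRange 0 (n - 2) 1).filter
        (fun p => PySem.List.slice historico (some p) (some (p + 3)) == padrao)).filter
        (fun j => decide (i + 3 ≤ j ∧ j < min (n - 1) (i + 200)))).filter
        (fun j => decide (j + 3 < n)))).Pairwise (· < ·) :=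
    List.Pairwise.sublist ((List.filter_sublist).trans ((List.filter_sublist).trans (List.filter_sublist)))
      (PySem.List.pairwise_lt_pyRange_one _ _)
  refine List.Pairwise.eq_of_mem_iff hP1 hP2 ?_
  intro x
  simp only [List.mem_filter, PySem.List.mem_pyRange_one, decide_eq_true_eq, beq_iff_eq]
  constructor
  · rintro ⟨⟨h1, h2⟩, h3, h4⟩
    exact ⟨⟨⟨⟨by omega, by omega⟩, h3⟩, by omega, h2⟩, h4⟩
  · rintro ⟨⟨⟨⟨h1, h2⟩, h3⟩, h4, h5⟩, h6⟩
    exact ⟨⟨h4, h5⟩, h3, h6⟩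

-- ===== VERDICT (by name: the statement is the Claim_ definition above) =====
theorem analisar_master_spec : Claim_equal_analisar_master := by
  intro historico _
  exact analisar_master_equal historico
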